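-- pv_equiv track=rewrite | github.com/MicheasRosenkreuz/PJP2016 | cv06/doors.py | __geterate_tree
-- ===== SOURCE A (Python) =====
-- from copy import copy
--
-- def __geterate_tree(word, wordlist, used, length):
--     used.add(word)
--     counter = []
--     for _word in (w for w in wordlist if w.startswith(word[-1])):
--         if _word not in used and _word is not None:
--             counter.append(
--                 __geterate_tree(_word, wordlist, copy(used), length + 1))
--     if counter:
--         return max(counter)
--     return length
-- ===== SOURCE B (Python) =====
-- def __geterate_tree(word, wordlist, used, length):
--     used.add(word)
--     return length + __chain(word[-1], wordlist, frozenset(used))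
--
--
-- def __chain(last, wordlist, blocked):
--     best = 0
--     for w in wordlist:
--         if w not in blocked and w.startswith(last):
--             best = max(best, 1 + __chain(w[-1], wordlist, blocked | {w}))
--     return best
-- ===== Notes on version B (the rewrite author's own statement) =====
-- stated objective: alternative
-- what changed: A threads `length` through an exponential DFS that builds a counter list at every node and takes max(counter) or falls back to length; B separates the arithmetic from the search: a length-free helper computes the longest chain count from a last character with a running maximum (no intermediate list, no length parameter), and the entry point returns length plus that count.
-- outside the precondition, e.g. on __geterate_tree('', [], set(), 0): A returns 0, B raises IndexError
import Mathlib
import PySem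

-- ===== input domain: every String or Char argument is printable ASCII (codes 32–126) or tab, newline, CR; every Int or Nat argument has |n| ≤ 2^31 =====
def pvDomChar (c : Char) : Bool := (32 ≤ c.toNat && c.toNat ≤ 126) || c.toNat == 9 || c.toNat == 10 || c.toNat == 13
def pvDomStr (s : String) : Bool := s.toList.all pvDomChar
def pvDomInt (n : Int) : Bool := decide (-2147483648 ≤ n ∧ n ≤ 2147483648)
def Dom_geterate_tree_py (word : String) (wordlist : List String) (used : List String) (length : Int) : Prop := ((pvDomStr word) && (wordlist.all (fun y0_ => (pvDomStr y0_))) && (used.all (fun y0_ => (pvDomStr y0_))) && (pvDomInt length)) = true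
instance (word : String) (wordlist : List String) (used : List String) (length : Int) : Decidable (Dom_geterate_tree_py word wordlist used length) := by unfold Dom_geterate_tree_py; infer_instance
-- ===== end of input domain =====

-- B re-decomposes A's DFS: a length-free chain search (longest chain count from a last
-- character) plus one addition, instead of threading `length` through the recursion;
-- equivalence is about the RETURN value (both Pythons also add `word` to the caller's `used`).

-- termination helpers, cited by both ports' decreasing_by
theorem pvFilterLenLe {α : Type} (l : List α) (p q : α → Bool)
    (h : ∀ x, q x = true → p x = true) : (l.filter q).length ≤ (l.filter p).length := by
  induction l with
  | nil => simp
  | cons b t ih =>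
    rcases hq : q b with _ | _
    · rcases hp : p b with _ | _ <;> simp [hq, hp] <;> omega
    · have hp := h b hq
      simp [hq, hp]; omega

theorem pvFilterLenLt {α : Type} (l : List α) (p q : α → Bool)
    (h : ∀ x, q x = true → p x = true) (a : α) (ha : a ∈ l)
    (hpa : p a = true) (hqa : q a = false) :
    (l.filter q).length < (l.filter p).length := by
  induction l with
  | nil => cases ha
  | cons b t ih =>
    rcases List.mem_cons.1 ha with rfl | hat
    · have hql : (t.filter q).length ≤ (t.filter p).length := pvFilterLenLe t p q h
      simp [hqa, hpa]; omega
    · have hlt := ih hat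
      rcases hq : q b with _ | _
      · rcases hp : p b with _ | _ <;> simp [hq, hp] <;> omega
      · have hp := h b hq
        simp [hq, hp]; omega

-- ===== PORT A =====
-- literal port of __geterate_tree: used.add(word); counter = [rec(w, wordlist, copy(used∪{word}), length+1)
-- for w in wordlist if w.startswith(word[-1]) and w not in used∪{word}]  (the `is not None` test is
-- vacuous on strings); return max(counter) if counter else length.  word[-1] on "" raises IndexError
-- in Python (excluded by Pre_); the mutation of the caller's `used` is a side effect, not the return value.
def geterate_tree_py (word : String) (wordlist : List String) (used : List String) (length : Int) : Int :=
  if wordlist = [] then length  -- the generator is lazy: word[-1] is never evaluated then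
  else
  match PySem.Str.pyGet? word (-1) with
  | none => 0   -- word = "" (and wordlist nonempty): Python raises IndexError here; outside Pre_
  | some c =>
    match PySem.List.max?
        ((((wordlist.filter (fun w => PySem.Str.startswith w (String.singleton c))).filter
            (fun w => !(PySem.Set.contains (PySem.Set.add used word) w))).attach).map
          (fun p => geterate_tree_py p.1 wordlist (PySem.Set.add used word) (length + 1)))
        (fun x => x) with
    | some m => m
    | none => length
termination_by (wordlist.filter (fun x => !(PySem.Set.contains (PySem.Set.add used word) x))).length
decreasing_by
  obtain ⟨hmem, hnotin⟩ := List.mem_filter.1 p.2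
  obtain ⟨hwl, _⟩ := List.mem_filter.1 hmem
  exact pvFilterLenLt wordlist
    (fun x => !(PySem.Set.contains (PySem.Set.add used word) x))
    (fun x => !(PySem.Set.contains (PySem.Set.add (PySem.Set.add used word) p.1) x))
    (by
      intro x hx
      simp only [Bool.not_eq_true'] at hx ⊢
      rcases hcx : PySem.Set.contains (PySem.Set.add used word) x with _ | _
      · rfl
      · have hmemx : x ∈ PySem.Set.add (PySem.Set.add used word) p.1 :=
          (PySem.Set.mem_add _ _ _).2 (Or.inl ((PySem.Set.contains_iff _ _).1 hcx))
        rw [(PySem.Set.contains_iff _ _).2 hmemx] at hx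
        cases hx)
    p.1 hwl hnotin
    (by simp)

-- ===== PORT B =====
-- literal port of Source B's __chain: best = 0; for w in wordlist: if w not in blocked and
-- w.startswith(last): best = max(best, 1 + __chain(w[-1], wordlist, blocked | {w})); return best.
-- `rem` is the tail of the for-loop still to scan (carried with its ∈-wordlist evidence for
-- termination); the `none` branch of w[-1] is unreachable from the entry point (there `last`
-- is a single character, so any w passing startswith is nonempty).
def pyChainLoop (wordlist : List String) (rem : List {w : String // w ∈ wordlist})
    (last : String) (blocked : PySem.Set String) (best : Int) : Int :=
  match rem with
  | [] => best
  | w :: rs =>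
    if h : (!(PySem.Set.contains blocked w.1) && PySem.Str.startswith w.1 last) = true then
      match PySem.Str.pyGet? w.1 (-1) with
      | none => pyChainLoop wordlist rs last blocked best
      | some c =>
        pyChainLoop wordlist rs last blocked
          (max best (1 + pyChainLoop wordlist wordlist.attach (String.singleton c)
            (PySem.Set.add blocked w.1) 0))
    else pyChainLoop wordlist rs last blocked best
termination_by
  (wordlist.filter (fun x => !(PySem.Set.contains blocked x))).length * (wordlist.length + 1)
    + rem.length
decreasing_by
  · simp only [List.length_cons]; omega
  · -- the recursive descent: blocked grows by w.1 ∈ wordlist, w.1 ∉ blocked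
    have hlt : (wordlist.filter (fun x => !(PySem.Set.contains (PySem.Set.add blocked w.1) x))).length
        < (wordlist.filter (fun x => !(PySem.Set.contains blocked x))).length := by
      rw [Bool.and_eq_true] at h
      obtain ⟨hnb, -⟩ := h
      exact pvFilterLenLt wordlist
        (fun x => !(PySem.Set.contains blocked x))
        (fun x => !(PySem.Set.contains (PySem.Set.add blocked w.1) x))
        (by
          intro x hx
          simp only [Bool.not_eq_true'] at hx ⊢
          rcases hcx : PySem.Set.contains blocked x with _ | _
          · rfl
          · have hmemx : x ∈ PySem.Set.add blocked w.1 :=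
              (PySem.Set.mem_add _ _ _).2 (Or.inl ((PySem.Set.contains_iff _ _).1 hcx))
            rw [(PySem.Set.contains_iff _ _).2 hmemx] at hx
            cases hx)
        w.1 w.2 hnb
        (by simp)
    rw [List.length_attach]
    calc (wordlist.filter (fun x => !(PySem.Set.contains (PySem.Set.add blocked w.1) x))).length
          * (wordlist.length + 1) + wordlist.length
        < ((wordlist.filter (fun x => !(PySem.Set.contains (PySem.Set.add blocked w.1) x))).length + 1)
          * (wordlist.length + 1) := by ring_nf; omega
      _ ≤ (wordlist.filter (fun x => !(PySem.Set.contains blocked x))).length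
          * (wordlist.length + 1) := Nat.mul_le_mul_right _ hlt
      _ ≤ _ := Nat.le_add_right _ _
  · simp only [List.length_cons]; omega
  · simp only [List.length_cons]; omega

-- literal port of Source B's __geterate_tree: used.add(word); return length + __chain(word[-1],
-- wordlist, frozenset(used)).  word[-1] on "" raises IndexError in Python; outside Pre_.
def geterate_tree_py_alt (word : String) (wordlist : List String) (used : List String) (length : Int) : Int :=
  match PySem.Str.pyGet? word (-1) with
  | none => 0
  | some c =>
    length + pyChainLoop wordlist wordlist.attach (String.singleton c) (PySem.Set.add used word) 0

-- ===== PRECONDITION & SPEC =====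
-- Pre_ excludes word = "": there A raises IndexError at word[-1] whenever wordlist is nonempty,
-- and on the corner word = "" with wordlist = [] A's lazy generator skips word[-1] and returns
-- length while B's Python evaluates word[-1] eagerly and raises; B raises on that excluded corner,
-- so it goes outside Pre_ (see claim.json "cites").
def Pre_geterate_tree_py (word : String) (wordlist : List String) (used : List String) (length : Int) : Prop :=
  word ≠ ""
instance (word : String) (wordlist : List String) (used : List String) (length : Int) : Decidable (Pre_geterate_tree_py word wordlist used length) := by unfold Pre_geterate_tree_py; infer_instance

def pvWitness_geterate_tree_py : String × List String × List String × Int :=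
  ("ab", ["bc", "ca", "ab"], [], 0)

def Spec_geterate_tree_py (word : String) (wordlist : List String) (used : List String) (length : Int) (out : Int) : Prop := out = geterate_tree_py_alt word wordlist used length
instance (word : String) (wordlist : List String) (used : List String) (length : Int) (out : Int) : Decidable (Spec_geterate_tree_py word wordlist used length out) := by unfold Spec_geterate_tree_py; infer_instance

-- ===== CLAIM (what is proved, stated in full; the proofs are below) =====
def Claim_equal_geterate_tree_py : Prop := ∀ (word : String) (wordlist : List String) (used : List String) (length : Int), Dom_geterate_tree_py word wordlist used length → Pre_geterate_tree_py word wordlist used length → Spec_geterate_tree_py word wordlist used length (geterate_tree_py word wordlist used length)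

-- ===== LEMMAS AND PROOFS =====

-- a nonempty Python string has a last character
theorem pvPyGetNegOne (cs : List Char) (h : cs ≠ []) :
    ∃ c, PySem.List.pyGet? cs (-1) = some c := by
  have hl : 1 ≤ cs.length := List.length_pos_of_ne_nil h
  have hlt : cs.length - 1 < cs.length := by omega
  refine ⟨cs[cs.length - 1], ?_⟩
  simp [PySem.List.pyGet?, PySem.List.pyIdx?, hl, List.getElem?_eq_getElem hlt]

-- the loop's accumulator only grows
theorem pvChainLoop_le (wordlist : List String) (rem : List {w : String // w ∈ wordlist})
    (last : String) (blocked : PySem.Set String) (best : Int) :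
    best ≤ pyChainLoop wordlist rem last blocked best := by
  induction rem generalizing best with
  | nil => simp [pyChainLoop]
  | cons w rs ih =>
    rw [pyChainLoop]
    split
    · split
      · exact ih best
      · exact le_trans (le_max_left _ _) (ih _)
    · exact ih best

-- the loop is a left fold over the remaining words
theorem pvChainLoop_eq_foldl (wordlist : List String) (rem : List {w : String // w ∈ wordlist})
    (last : String) (blocked : PySem.Set String) (best : Int) :
    pyChainLoop wordlist rem last blocked best =
      rem.foldl (fun b w =>
        if (!(PySem.Set.contains blocked w.1) && PySem.Str.startswith w.1 last) = true then
          match PySem.Str.pyGet? w.1 (-1) with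
          | none => b
          | some c => max b (1 + pyChainLoop wordlist wordlist.attach (String.singleton c)
              (PySem.Set.add blocked w.1) 0)
        else b) best := by
  induction rem generalizing best with
  | nil => simp [pyChainLoop]
  | cons w rs ih =>
    rw [pyChainLoop]
    simp only [List.foldl_cons]
    split
    · rcases PySem.Str.pyGet? w.1 (-1) with _ | c <;> exact ih _
    · exact ih best

-- max-of-list (A's shape) vs running max (B's shape), shifted by the length offset
theorem pvFoldShift (K : String → Int) (L : Int) (ws : List String) :
    ∀ a : Int, (ws.map (fun w => L + (1 + K w))).foldl max (L + a)
      = L + ws.foldl (fun b w => max b (1 + K w)) a := by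
  induction ws with
  | nil => intro a; rfl
  | cons w t ih =>
    intro a
    simp only [List.map_cons, List.foldl_cons, Int.max_add_left]
    exact ih _

theorem pvMaxMatch (K : String → Int) (L : Int) (sel : List String)
    (hK : ∀ w ∈ sel, 0 ≤ K w) :
    (match PySem.List.max? (sel.map (fun w => L + (1 + K w))) (fun x => x) with
      | some m => m
      | none => L)
    = L + sel.foldl (fun b w => max b (1 + K w)) 0 := by
  cases sel with
  | nil => simp [PySem.List.max?]
  | cons w t =>
    have h0 : max 0 (1 + K w) = 1 + K w := by
      have := hK w (List.mem_cons_self ..)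
      omega
    simp only [List.map_cons, PySem.List.max?_id_cons, List.foldl_cons, h0]
    have := pvFoldShift K L t (1 + K w)
    simpa using this

-- beta-expanded forms of List.attach_map_val / List.foldl_attach (cited; needed for first-order rewriting)
theorem pvAttachMap {α β : Type} (l : List α) (F : α → β) :
    l.attach.map (fun p => F p.1) = l.map F := List.attach_map_val

theorem pvFoldlAttach {α β : Type} (l : List α) (F : β → α → β) (b : β) :
    l.attach.foldl (fun acc p => F acc p.1) b = l.foldl F b := List.foldl_attach

-- the value B's chain search assigns to a successor word (its last character drives the recursion)
def pvK (wl : List String) (u : PySem.Set String) (w : String) : Int :=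
  match PySem.Str.pyGet? w (-1) with
  | none => 0
  | some c' => pyChainLoop wl wl.attach (String.singleton c') (PySem.Set.add u w) 0

-- a word that starts with a one-character prefix has a last character
theorem pvLastChar (w : String) (c : Char)
    (h : PySem.Str.startswith w (String.singleton c) = true) :
    ∃ cw, PySem.Str.pyGet? w (-1) = some cw := by
  rw [PySem.Str.startswith_eq] at h
  have hpre := (PySem.Chars.startswith_iff _ _).1 h
  have hsing : (String.singleton c).toList = [c] := by simp
  rw [hsing] at hpre
  have hne : w.toList ≠ [] := by
    intro h0
    rw [h0] at hpre
    simp_all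
  obtain ⟨cw, hcw⟩ := pvPyGetNegOne _ hne
  refine ⟨cw, ?_⟩
  rw [PySem.Str.pyGet?_eq]
  exact hcw

-- the central invariant: A's recursion equals length + B's chain search
theorem pvMain (wl : List String) : ∀ (n : Nat) (word : String) (used : List String)
    (length : Int) (c : Char),
    PySem.Str.pyGet? word (-1) = some c →
    (wl.filter (fun x => !(PySem.Set.contains (PySem.Set.add used word) x))).length ≤ n →
    geterate_tree_py word wl used length =
      length + pyChainLoop wl wl.attach (String.singleton c) (PySem.Set.add used word) 0 := by
  intro n
  induction n using Nat.strong_induction_on with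
  | _ n IH =>
    intro word used length c hc hn
    by_cases hwl : wl = []
    · subst hwl
      rw [geterate_tree_py, if_pos rfl]
      have h0 : pyChainLoop [] (List.attach ([] : List String)) (String.singleton c)
          (PySem.Set.add used word) 0 = 0 := by
        rw [pvChainLoop_eq_foldl]
        rfl
      rw [h0]
      omega
    · rw [geterate_tree_py, if_neg hwl, hc]
      simp only []
      -- rewrite every recursive call of A through the induction hypothesis
      have hchild : ∀ w ∈ (List.filter (fun w => !(PySem.Set.add used word).contains w)
            (List.filter (fun w => PySem.Str.startswith w (String.singleton c)) wl)),
          geterate_tree_py w wl (PySem.Set.add used word) (length + 1)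
            = length + (1 + pvK wl (PySem.Set.add used word) w) := by
        intro w hw
        obtain ⟨hmem, hnotin⟩ := List.mem_filter.1 hw
        obtain ⟨hwl, hsw⟩ := List.mem_filter.1 hmem
        have hlt : (wl.filter (fun x =>
              !(PySem.Set.contains (PySem.Set.add (PySem.Set.add used word) w) x))).length
            < (wl.filter (fun x => !(PySem.Set.contains (PySem.Set.add used word) x))).length := by
          refine pvFilterLenLt wl _ _ ?_ w hwl hnotin ?_
          · intro x hx
            simp only [Bool.not_eq_true'] at hx ⊢
            rcases hcx : PySem.Set.contains (PySem.Set.add used word) x with _ | _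
            · rfl
            · have hmemx : x ∈ PySem.Set.add (PySem.Set.add used word) w :=
                (PySem.Set.mem_add _ _ _).2 (Or.inl ((PySem.Set.contains_iff _ _).1 hcx))
              rw [(PySem.Set.contains_iff _ _).2 hmemx] at hx
              cases hx
          · simp
        obtain ⟨cw, hcw⟩ := pvLastChar w c hsw
        have hIH := IH _ (lt_of_lt_of_le hlt hn) w (PySem.Set.add used word) (length + 1)
          cw hcw le_rfl
        rw [hIH]
        simp only [pvK, hcw]
        omega
      have h1 : (List.filter (fun w => !(PySem.Set.add used word).contains w)
            (List.filter (fun w => PySem.Str.startswith w (String.singleton c)) wl)).attach.map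
            (fun p => geterate_tree_py p.1 wl (PySem.Set.add used word) (length + 1))
          = (wl.filter (fun w => !(PySem.Set.add used word).contains w
              && PySem.Str.startswith w (String.singleton c))).map
            (fun w => length + (1 + pvK wl (PySem.Set.add used word) w)) := by
        refine (pvAttachMap _ (fun w => geterate_tree_py w wl (PySem.Set.add used word)
          (length + 1))).trans ?_
        rw [List.map_congr_left hchild, List.filter_filter]
      have hK : ∀ w ∈ (wl.filter (fun w => !(PySem.Set.add used word).contains w
            && PySem.Str.startswith w (String.singleton c))),
          0 ≤ pvK wl (PySem.Set.add used word) w := by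
        intro w _
        unfold pvK
        rcases PySem.Str.pyGet? w (-1) with _ | cw
        · exact le_refl 0
        · exact pvChainLoop_le _ _ _ _ 0
      have h2 : pyChainLoop wl wl.attach (String.singleton c) (PySem.Set.add used word) 0
          = (wl.filter (fun w => !(PySem.Set.add used word).contains w
              && PySem.Str.startswith w (String.singleton c))).foldl
            (fun b w => max b (1 + pvK wl (PySem.Set.add used word) w)) 0 := by
        rw [pvChainLoop_eq_foldl]
        refine (pvFoldlAttach wl (fun b x =>
          if (!(PySem.Set.contains (PySem.Set.add used word) x)
              && PySem.Str.startswith x (String.singleton c)) = true then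
            match PySem.Str.pyGet? x (-1) with
            | none => b
            | some c' => max b (1 + pyChainLoop wl wl.attach (String.singleton c')
                (PySem.Set.add (PySem.Set.add used word) x) 0)
          else b) 0).trans ?_
        rw [← List.foldl_filter]
        refine PySem.List.foldl_congr_mem _ _ _ _ ?_
        intro acc x hx
        obtain ⟨-, hcond⟩ := List.mem_filter.1 hx
        rw [Bool.and_eq_true] at hcond
        obtain ⟨cx, hcx⟩ := pvLastChar x c hcond.2
        rw [hcx]
        show max acc (1 + pyChainLoop wl wl.attach (String.singleton cx)
            (PySem.Set.add (PySem.Set.add used word) x) 0)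
          = max acc (1 + pvK wl (PySem.Set.add used word) x)
        simp only [pvK, hcx]
      rw [h1, h2]
      exact pvMaxMatch (pvK wl (PySem.Set.add used word)) length _ hK
-- ===== VERDICT (by name: the statement is the Claim_ definition above) =====
theorem geterate_tree_py_spec : Claim_equal_geterate_tree_py := by
  intro word wordlist used length _hdom hpre
  unfold Spec_geterate_tree_py geterate_tree_py_alt
  have hne : word.toList ≠ [] := fun h0 => hpre (String.toList_eq_nil_iff.mp h0)
  obtain ⟨c, hc⟩ := pvPyGetNegOne _ hne
  have hc' : PySem.Str.pyGet? word (-1) = some c := by rw [PySem.Str.pyGet?_eq]; exact hc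
  rw [hc']
  exact pvMain wordlist _ word used length c hc' le_rfl
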